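-- pv_equiv track=rewrite | github.com/terragraph/tgnms | analytics/link_insights/link_insight.py | find_largest_ts_idx
-- ===== SOURCE A (Python) =====
-- def find_largest_ts_idx(link_available_ts, end_timestamp):
--     """
--     Find the index of the largest time stamp that is smaller than the end_timestamp.
--
--     Args:
--     link_available_ts: a list of time stamps, should be in ascending order.
--     end_timestamp: the end_timestamp of a link uptime window.
--
--     Return:
--     start_idx: the index of the largest time stamp whose value is smaller or equal
--     to end_timestamp.
--     """
--     if link_available_ts[-1] <= end_timestamp:
--         return len(link_available_ts) - 1
--
--     start_idx = 0
--     end_idx = len(link_available_ts) - 1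
--
--     # Find the smallest idx that is larger than the end_timestamp
--     while start_idx != end_idx:
--         mid_idx = int((start_idx + end_idx) / 2)
--         if link_available_ts[mid_idx] <= end_timestamp:
--             start_idx = mid_idx + 1
--         else:
--             end_idx = mid_idx
--
--     if end_idx > 0:
--         end_idx -= 1
--
--     return end_idx
-- ===== SOURCE B (Python) =====
-- def find_largest_ts_idx(link_available_ts, end_timestamp):
--     """Single forward scan: track the last index whose timestamp is <= end_timestamp,
--     stop at the first timestamp above it (list is ascending)."""
--     start_idx = 0
--     for i, ts in enumerate(link_available_ts):
--         if ts > end_timestamp: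
--             break
--         start_idx = i
--     return start_idx
-- ===== Notes on version B (the rewrite author's own statement) =====
-- stated objective: simpler
-- what changed: Replaces the guarded binary search (shortcut + while-loop with midpoint arithmetic and a post-decrement) by a single forward scan that tracks the last index whose timestamp is <= end_timestamp and stops at the first larger one.
-- outside the precondition, e.g. on find_largest_ts_idx([3, 1, 2], 2): A returns 2, B returns 0
import Mathlib
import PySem

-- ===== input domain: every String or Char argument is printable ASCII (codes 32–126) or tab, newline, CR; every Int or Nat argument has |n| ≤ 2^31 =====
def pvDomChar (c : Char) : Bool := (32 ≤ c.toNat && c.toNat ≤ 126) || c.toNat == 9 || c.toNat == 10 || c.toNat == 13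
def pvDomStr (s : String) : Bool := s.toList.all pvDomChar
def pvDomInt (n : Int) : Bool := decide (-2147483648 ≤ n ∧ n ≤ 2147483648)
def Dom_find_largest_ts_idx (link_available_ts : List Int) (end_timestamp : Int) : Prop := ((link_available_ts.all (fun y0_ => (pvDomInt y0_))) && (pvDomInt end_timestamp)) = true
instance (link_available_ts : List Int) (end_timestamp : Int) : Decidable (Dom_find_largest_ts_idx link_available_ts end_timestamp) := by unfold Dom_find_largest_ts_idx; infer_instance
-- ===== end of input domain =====

-- B replaces A's guarded binary search by a single forward scan tracking the last
-- index whose timestamp is ≤ end_timestamp (objective: simpler; not faster).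

-- ===== PORT A =====
-- the while-loop of A; Python's condition is `start_idx != end_idx`, and invariantly
-- 0 ≤ start_idx ≤ end_idx on every reachable state, so `s < e` is the same test there;
-- it only makes termination evident.  int((s+e)/2) = floor((s+e)/2) for s,e ≥ 0.
def pvALoop (xs : List Int) (end_ts : Int) (s e : Int) : Int :=
  if s < e then
    let mid := PySem.Int.floordiv (s + e) 2
    -- xs[mid_idx]: mid is always in range here, so .getD 0 is unreachable
    if (PySem.List.pyGet? xs mid).getD 0 ≤ end_ts then pvALoop xs end_ts (mid + 1) e
    else pvALoop xs end_ts s mid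
  else e
termination_by (e - s).toNat
decreasing_by
  · have h2 := PySem.Int.floordiv_eq_ediv_of_pos (a := s + e) (b := 2) (by omega)
    omega
  · have h2 := PySem.Int.floordiv_eq_ediv_of_pos (a := s + e) (b := 2) (by omega)
    omega

def find_largest_ts_idx (link_available_ts : List Int) (end_timestamp : Int) : Int :=
  -- link_available_ts[-1] raises IndexError on the empty list; Pre_ excludes it,
  -- so the .getD 0 default is never taken on admitted inputs
  if (PySem.List.pyGet? link_available_ts (-1)).getD 0 ≤ end_timestamp then
    (link_available_ts.length : Int) - 1
  else
    let e := pvALoop link_available_ts end_timestamp 0 ((link_available_ts.length : Int) - 1)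
    if e > 0 then e - 1 else e

-- ===== PORT B =====
-- the for-loop of B: i is the enumerate index, acc the running start_idx
def pvBLoop (end_ts : Int) : List Int → Int → Int → Int
  | [], _, acc => acc
  | t :: rest, i, acc => if t > end_ts then acc else pvBLoop end_ts rest (i + 1) i

def find_largest_ts_idx_alt (link_available_ts : List Int) (end_timestamp : Int) : Int :=
  pvBLoop end_timestamp link_available_ts 0 0

-- ===== PRECONDITION & SPEC =====
-- Pre_ = nonempty, and the elements ≤ end_timestamp form a prefix of the list (implied
-- by the documented contract "a list of time stamps, should be in ascending order").
-- It excludes the empty list, where A raises IndexError, and lists that are unsorted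
-- around end_timestamp, where A's binary-search result is an accident of its probes.
def Pre_find_largest_ts_idx (link_available_ts : List Int) (end_timestamp : Int) : Prop :=
  link_available_ts ≠ [] ∧
    link_available_ts.Pairwise (fun a b => b ≤ end_timestamp → a ≤ end_timestamp)

instance (link_available_ts : List Int) (end_timestamp : Int) : Decidable (Pre_find_largest_ts_idx link_available_ts end_timestamp) := by unfold Pre_find_largest_ts_idx; infer_instance

def pvWitness_find_largest_ts_idx : List Int × Int := ([1, 3, 5, 7], 4)

def Spec_find_largest_ts_idx (link_available_ts : List Int) (end_timestamp : Int) (out : Int) : Prop := out = find_largest_ts_idx_alt link_available_ts end_timestamp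
instance (link_available_ts : List Int) (end_timestamp : Int) (out : Int) : Decidable (Spec_find_largest_ts_idx link_available_ts end_timestamp out) := by unfold Spec_find_largest_ts_idx; infer_instance

-- ===== CLAIM (what is proved, stated in full; the proofs are below) =====
def Claim_equal_find_largest_ts_idx : Prop := ∀ (link_available_ts : List Int) (end_timestamp : Int), Dom_find_largest_ts_idx link_available_ts end_timestamp → Pre_find_largest_ts_idx link_available_ts end_timestamp → Spec_find_largest_ts_idx link_available_ts end_timestamp (find_largest_ts_idx link_available_ts end_timestamp)


-- ===== LEMMAS AND PROOFS =====

-- k = number of leading timestamps ≤ end_ts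
def pvK (xs : List Int) (end_ts : Int) : Nat :=
  (xs.takeWhile (fun t => decide (t ≤ end_ts))).length

lemma pvK_le_length (xs : List Int) (end_ts : Int) : pvK xs end_ts ≤ xs.length :=
  (List.takeWhile_prefix _).length_le

lemma pvK_lt (xs : List Int) (end_ts : Int) {i : Nat} (hi : i < pvK xs end_ts) :
    xs[i]'(lt_of_lt_of_le hi (pvK_le_length xs end_ts)) ≤ end_ts := by
  have h := (List.takeWhile_prefix (l := xs) (fun t => decide (t ≤ end_ts))).getElem (i := i) hi
  have hmem : (List.takeWhile (fun t => decide (t ≤ end_ts)) xs)[i]'hi ∈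
      List.takeWhile (fun t => decide (t ≤ end_ts)) xs := List.getElem_mem hi
  have hp := List.mem_takeWhile_imp hmem
  rw [h] at hp
  exact of_decide_eq_true hp

lemma pvK_at : ∀ (xs : List Int) (end_ts : Int) (h : pvK xs end_ts < xs.length),
    end_ts < xs[pvK xs end_ts] := by
  intro xs end_ts
  induction xs with
  | nil => simp [pvK]
  | cons x rest ih =>
    intro h
    by_cases hx : x ≤ end_ts
    · have hk : pvK (x :: rest) end_ts = pvK rest end_ts + 1 := by simp [pvK, hx]
      rw [getElem_congr_idx hk, List.getElem_cons_succ]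
      exact ih (by rw [hk] at h; simpa using h)
    · have hk : pvK (x :: rest) end_ts = 0 := by simp [pvK, hx]
      rw [getElem_congr_idx hk, List.getElem_cons_zero]
      exact lt_of_not_ge hx

-- in a sorted list, xs[i] ≤ end_ts exactly for i < k
lemma pvK_ge (xs : List Int) (end_ts : Int)
    (hs : xs.Pairwise (fun a b => b ≤ end_ts → a ≤ end_ts))
    {i : Nat} (hi : i < xs.length) (hk : pvK xs end_ts ≤ i) : end_ts < xs[i] := by
  have hkl : pvK xs end_ts < xs.length := lt_of_le_of_lt hk hi
  have h1 := pvK_at xs end_ts hkl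
  rcases eq_or_lt_of_le hk with h | h
  · rw [getElem_congr_idx h.symm]; exact h1
  · by_contra hcon
    exact absurd (List.pairwise_iff_getElem.mp hs (pvK xs end_ts) i hkl hi h
      (not_lt.mp hcon)) (not_le.mpr h1)

lemma pvBLoop_eq (end_ts : Int) :
    ∀ (xs : List Int) (i acc : Int),
      pvBLoop end_ts xs i acc =
        if pvK xs end_ts = 0 then acc else i + (pvK xs end_ts : Int) - 1 := by
  intro xs
  induction xs with
  | nil => intro i acc; simp [pvBLoop, pvK]
  | cons t rest ih =>
    intro i acc
    by_cases ht : t > end_ts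
    · have hk : pvK (t :: rest) end_ts = 0 := by
        simp [pvK, not_le.mpr ht]
      simp [pvBLoop, ht, hk]
    · have hk : pvK (t :: rest) end_ts = pvK rest end_ts + 1 := by
        simp [pvK, le_of_not_gt ht]
      rw [pvBLoop, if_neg (by simpa using ht), ih, hk]
      split
      · rename_i h; simp [h]
      · rename_i h; push_cast; omega

lemma pvALoop_eq (xs : List Int) (end_ts : Int)
    (hs : xs.Pairwise (fun a b => b ≤ end_ts → a ≤ end_ts)) :
    ∀ (n : Nat) (s e : Int), (e - s).toNat ≤ n → 0 ≤ s → s ≤ (pvK xs end_ts : Int) →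
      (pvK xs end_ts : Int) ≤ e → e < (xs.length : Int) →
      pvALoop xs end_ts s e = (pvK xs end_ts : Int) := by
  intro n
  induction n with
  | zero =>
    intro s e hn h0 hsk hke hel
    rw [pvALoop, if_neg (by omega)]
    omega
  | succ n ih =>
    intro s e hn h0 hsk hke hel
    by_cases hse : s < e
    · rw [pvALoop, if_pos hse]
      show (if (PySem.List.pyGet? xs (PySem.Int.floordiv (s + e) 2)).getD 0 ≤ end_ts then
          pvALoop xs end_ts (PySem.Int.floordiv (s + e) 2 + 1) e
        else pvALoop xs end_ts s (PySem.Int.floordiv (s + e) 2)) = (pvK xs end_ts : Int)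
      have hfd := PySem.Int.floordiv_eq_ediv_of_pos (a := s + e) (b := 2) (by omega)
      rw [hfd]
      set mid := (s + e) / 2 with hmid
      have hb1 : s ≤ mid := by omega
      have hb2 : mid < e := by omega
      have hmr : mid.toNat < xs.length := by omega
      rw [PySem.List.pyGet?_eq_some_getElem xs (i := mid) (by omega) (by omega)]
      simp only [Option.getD_some]
      by_cases hle : xs[mid.toNat] ≤ end_ts
      · rw [if_pos hle]
        have hmk : mid.toNat < pvK xs end_ts := by
          by_contra hcon
          exact absurd hle (not_le.mpr (pvK_ge xs end_ts hs hmr (by omega)))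
        exact ih (mid + 1) e (by omega) (by omega) (by omega) hke hel
      · rw [if_neg hle]
        have hmk : pvK xs end_ts ≤ mid.toNat := by
          by_contra hcon
          exact hle (pvK_lt xs end_ts (not_le.mp hcon))
        exact ih s mid (by omega) h0 hsk (by omega) (by omega)
    · rw [pvALoop, if_neg hse]
      omega

lemma pvAlt_eq (xs : List Int) (end_ts : Int) :
    find_largest_ts_idx_alt xs end_ts =
      if pvK xs end_ts = 0 then 0 else (pvK xs end_ts : Int) - 1 := by
  rw [find_largest_ts_idx_alt, pvBLoop_eq]
  split <;> simp

-- ===== VERDICT (by name: the statement is the Claim_ definition above) =====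
theorem find_largest_ts_idx_spec : Claim_equal_find_largest_ts_idx := by
  intro xs end_ts _ hpre
  obtain ⟨hne, hs⟩ := hpre
  have hlen : 0 < xs.length := List.length_pos_iff.mpr hne
  unfold Spec_find_largest_ts_idx find_largest_ts_idx
  rw [pvAlt_eq]
  have hlast : PySem.List.pyGet? xs (-1) = some (xs[xs.length - 1]'(by omega)) := by
    rw [PySem.List.pyGet?_neg_one, List.getLast?_eq_getElem?,
      List.getElem?_eq_getElem (by omega)]
  rw [hlast]
  simp only [Option.getD_some]
  by_cases hend : xs[xs.length - 1]'(by omega) ≤ end_ts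
  · -- every element is ≤ end_ts, so k = length and both sides are length - 1
    rw [if_pos hend]
    have hk : pvK xs end_ts = xs.length := by
      have hself : xs.takeWhile (fun t => decide (t ≤ end_ts)) = xs := by
        rw [List.takeWhile_eq_self_iff]
        intro x hx
        obtain ⟨i, hi, rfl⟩ := List.getElem_of_mem hx
        apply decide_eq_true
        have hile : i ≤ xs.length - 1 := by omega
        rcases eq_or_lt_of_le hile with h | h
        · rw [getElem_congr_idx h]; exact hend
        · exact List.pairwise_iff_getElem.mp hs i (xs.length - 1) hi (by omega) h hend
      simp [pvK, hself]
    rw [hk, if_neg (by omega)]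
  · rw [if_neg hend]
    have hkl : pvK xs end_ts < xs.length := by
      by_contra hcon
      exact hend (pvK_lt xs end_ts (by omega))
    have hloop := pvALoop_eq xs end_ts hs xs.length 0
      ((xs.length : Int) - 1) (by omega) (by omega) (by omega) (by omega) (by omega)
    rw [hloop]
    split
    · rename_i h; omega
    · rename_i h
      have : pvK xs end_ts = 0 := by omega
      simp [this]
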